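-- pv_equiv track=rewrite | github.com/yangwu1227/leetcode-ds-algo | hashing/counting/python3/max_subarray_unique.py | max_subarray_unique
-- ===== SOURCE A (Python) =====
-- from collections import defaultdict
-- from collections.abc import Sequence
--
-- def max_subarray_unique(nums: Sequence[int]) -> int:
--     """
--     Given an array of positive integers `nums`, find the maximum sum among all unique subarrays.
--
--     Parameters
--     ----------
--     nums : Sequence[int]
--         A sequence of positive integers
--
--     Returns
--     -------
--     int
--         The maximum sum of the unique subarray
--     """
--     if len(nums) == 1:
--         return nums[0]
--     counts = defaultdict(int)
--     left = max_sum = current_sum = 0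
--     # O(n) operation
--     for right in range(len(nums)):
--         # Add to counts hash map and update current sum
--         counts[nums[right]] += 1
--         current_sum += nums[right]
--         # If the count of any element exceeds 1, window has become invalid
--         while counts[nums[right]] > 1:
--             # Decrement the count of the element pointed to by the left pointer, shrinking the window
--             counts[nums[left]] -= 1
--             # Subtract from nums[left] from the current window sum
--             current_sum -= nums[left]
--             # Slide the window rightward
--             left += 1
--         # See if we have found a larger sum
--         max_sum = max(max_sum, current_sum)
--
--     return max_sum
-- ===== SOURCE B (Python) =====
-- def max_subarray_unique(nums):
--     """Max sum over subarrays with all-distinct elements, via prefix sums and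
--     a last-occurrence index instead of a shrinking counted window."""
--     if len(nums) == 1:
--         return nums[0]
--     prefix = [0]
--     for x in nums:
--         prefix.append(prefix[-1] + x)
--     last_index = {}
--     left = 0
--     max_sum = 0
--     for right, v in enumerate(nums):
--         j = last_index.get(v, -1) + 1
--         if j > left:
--             left = j
--         last_index[v] = right
--         s = prefix[right + 1] - prefix[left]
--         if s > max_sum:
--             max_sum = s
--     return max_sum
-- ===== Notes on version B (the rewrite author's own statement) =====
-- stated objective: alternative
-- what changed: Replaces the counted sliding window (defaultdict of counts, running current_sum, inner while-loop that shrinks the window element by element) with a prefix-sum table plus a last-occurrence index: the left bound jumps directly to last_index[v]+1 and each window sum is read off as prefix[right+1]-prefix[left], so there is no inner loop and no multiset of counts.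
import Mathlib
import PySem

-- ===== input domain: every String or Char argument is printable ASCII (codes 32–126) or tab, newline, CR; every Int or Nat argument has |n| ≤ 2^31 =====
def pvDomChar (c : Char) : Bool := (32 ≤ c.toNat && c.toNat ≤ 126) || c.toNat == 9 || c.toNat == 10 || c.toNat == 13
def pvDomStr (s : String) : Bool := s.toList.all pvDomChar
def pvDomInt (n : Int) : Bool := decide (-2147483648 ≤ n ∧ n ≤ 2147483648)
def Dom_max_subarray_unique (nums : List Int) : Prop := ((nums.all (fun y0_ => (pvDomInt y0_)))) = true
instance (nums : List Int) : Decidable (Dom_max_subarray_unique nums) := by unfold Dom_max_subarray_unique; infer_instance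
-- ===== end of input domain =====

-- B replaces A's counted sliding window (defaultdict of counts + inner shrink loop + running sum)
-- with a prefix-sum table and a last-occurrence index; same results, no speed claim.


-- ===== PORT A =====
-- A's inner `while counts[nums[right]] > 1:` loop, step for step; the fuel argument
-- (always called with len(nums), proved sufficient below) only makes the recursion total.
def pvShrink (nums : List Int) (v : Int) :
    Nat → PySem.Dict Int Int × Int × Nat → PySem.Dict Int Int × Int × Nat
  | 0, st => st
  | fuel+1, (counts, curr, left) =>
    if 1 < counts.getD v 0 then
      pvShrink nums v fuel
        (counts.modify (nums.getD left 0) 0 (· - 1), curr - nums.getD left 0, left + 1)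
    else (counts, curr, left)

-- one iteration of A's `for right in range(len(nums))` loop; state = (counts, left, max_sum, current_sum)
def pvStepA (nums : List Int) (st : PySem.Dict Int Int × Nat × Int × Int) (right : Nat) :
    PySem.Dict Int Int × Nat × Int × Int :=
  let v := nums.getD right 0
  let counts := st.1.modify v 0 (· + 1)            -- counts[nums[right]] += 1  (defaultdict(int))
  let curr := st.2.2.2 + v
  let res := pvShrink nums v nums.length (counts, curr, st.2.1)
  (res.1, res.2.2, max st.2.2.1 res.2.1, res.2.1)  -- max_sum = max(max_sum, current_sum)

def max_subarray_unique (nums : List Int) : Int :=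
  if nums.length = 1 then nums.getD 0 0
  else ((List.range nums.length).foldl (pvStepA nums) (PySem.Dict.empty, 0, 0, 0)).2.2.1

-- ===== PORT B =====
-- prefix = [0]; for x in nums: prefix.append(prefix[-1] + x)
def pvPrefix (nums : List Int) : List Int :=
  nums.foldl (fun acc x => acc ++ [acc.getLastD 0 + x]) [0]

-- one iteration of B's `for right, v in enumerate(nums)` loop; state = (last_index, left, max_sum)
def pvStepB (pre : List Int) (st : PySem.Dict Int Nat × Nat × Int) (p : Int × Nat) :
    PySem.Dict Int Nat × Nat × Int :=
  -- j = last_index.get(v, -1) + 1, on Nat: the absent case -1 + 1 is 0 (indices are ≥ 0)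
  let j : Nat := match st.1.get? p.1 with | some i => i + 1 | none => 0
  let left := if st.2.1 < j then j else st.2.1     -- if j > left: left = j
  let s := pre.getD (p.2 + 1) 0 - pre.getD left 0  -- s = prefix[right+1] - prefix[left]
  (st.1.insert p.1 p.2, left, if st.2.2 < s then s else st.2.2)

def max_subarray_unique_alt (nums : List Int) : Int :=
  if nums.length = 1 then nums.getD 0 0
  else (nums.zipIdx.foldl (pvStepB (pvPrefix nums)) (PySem.Dict.empty, 0, 0)).2.2

-- ===== PRECONDITION & SPEC =====
def Spec_max_subarray_unique (nums : List Int) (out : Int) : Prop := out = max_subarray_unique_alt nums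
instance (nums : List Int) (out : Int) : Decidable (Spec_max_subarray_unique nums out) := by unfold Spec_max_subarray_unique; infer_instance

-- ===== CLAIM (what is proved, stated in full; the proofs are below) =====
def Claim_equal_max_subarray_unique : Prop := ∀ (nums : List Int), Dom_max_subarray_unique nums → Spec_max_subarray_unique nums (max_subarray_unique nums)

-- ===== LEMMAS AND PROOFS =====

-- the window nums[L:R] as a list
def pvWin (nums : List Int) (L R : Nat) : List Int := (nums.take R).drop L

-- partial folds: state of each loop after the first r iterations
def pvFoldA (nums : List Int) (r : Nat) : PySem.Dict Int Int × Nat × Int × Int :=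
  (List.range r).foldl (pvStepA nums) (PySem.Dict.empty, 0, 0, 0)
def pvFoldB (nums : List Int) (r : Nat) : PySem.Dict Int Nat × Nat × Int :=
  ((nums.take r).zipIdx.foldl (pvStepB (pvPrefix nums)) (PySem.Dict.empty, 0, 0))

-- the coupled loop invariant after r iterations
def pvInv (nums : List Int) (r : Nat)
    (a : PySem.Dict Int Int × Nat × Int × Int) (b : PySem.Dict Int Nat × Nat × Int) : Prop :=
  a.2.1 = b.2.1 ∧ a.2.2.1 = b.2.2 ∧ b.2.1 ≤ r ∧
  a.2.2.2 = (nums.take r).sum - (nums.take b.2.1).sum ∧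
  (pvWin nums b.2.1 r).Nodup ∧
  (∀ x, a.1.getD x 0 = ((pvWin nums b.2.1 r).count x : Int)) ∧
  (∀ x i, b.1.get? x = some i →
    i < r ∧ nums.getD i 0 = x ∧ ∀ k, i < k → k < r → nums.getD k 0 ≠ x) ∧
  (∀ x, b.1.get? x = none → ∀ k, k < r → nums.getD k 0 ≠ x)

lemma pvWin_cons (nums : List Int) (L R : Nat) (h1 : L < R) (h2 : R ≤ nums.length) :
    pvWin nums L R = nums.getD L 0 :: pvWin nums (L+1) R := by
  unfold pvWin
  have hlen : L < (nums.take R).length := by simp [List.length_take]; omega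
  rw [List.drop_eq_getElem_cons hlen]
  congr 1
  rw [List.getElem_take]
  exact (List.getD_eq_getElem nums 0 (by omega)).symm

lemma pvWin_snoc (nums : List Int) (L R : Nat) (h1 : L ≤ R) (h2 : R < nums.length) :
    pvWin nums L (R+1) = pvWin nums L R ++ [nums.getD R 0] := by
  unfold pvWin
  rw [List.take_add_one, List.getElem?_eq_getElem h2]
  have : (nums.take R).length = R := by simp [List.length_take]; omega
  rw [List.drop_append_of_le_length (by omega)]
  simp [List.getElem?_eq_getElem h2]

lemma pvWin_getElem (nums : List Int) (L R j : Nat) (h2 : R ≤ nums.length)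
    (hj : j < (pvWin nums L R).length) : (pvWin nums L R)[j] = nums.getD (L + j) 0 := by
  unfold pvWin at *
  have hlen : (nums.take R).length = R := by simp [List.length_take]; omega
  rw [List.getElem_drop, List.getElem_take]
  have : L + j < R := by simp [List.length_drop, hlen] at hj; omega
  exact (List.getD_eq_getElem nums 0 (by omega)).symm

lemma pvWin_length (nums : List Int) (L R : Nat) (h2 : R ≤ nums.length) :
    (pvWin nums L R).length = R - L := by
  unfold pvWin; simp [List.length_drop, List.length_take]; omega

lemma pvMem_win_iff (nums : List Int) (v : Int) (L R : Nat) (h2 : R ≤ nums.length) :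
    v ∈ pvWin nums L R ↔ ∃ i, L ≤ i ∧ i < R ∧ nums.getD i 0 = v := by
  constructor
  · intro hm
    obtain ⟨j, hj, hv⟩ := List.mem_iff_getElem.mp hm
    refine ⟨L + j, by omega, ?_, ?_⟩
    · have := pvWin_length nums L R h2; omega
    · rw [← pvWin_getElem nums L R j h2 hj, hv]
  · rintro ⟨i, hLi, hiR, hv⟩
    apply List.mem_iff_getElem.mpr
    refine ⟨i - L, ?_, ?_⟩
    · rw [pvWin_length nums L R h2]; omega
    · rw [pvWin_getElem nums L R _ h2 (by rw [pvWin_length nums L R h2]; omega)]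
      rw [Nat.add_sub_cancel' hLi]; exact hv

lemma pvWin_suffix_nodup (nums : List Int) (L L' R : Nat) (hLL : L ≤ L')
    (h : (pvWin nums L R).Nodup) : (pvWin nums L' R).Nodup := by
  have : pvWin nums L' R = (pvWin nums L R).drop (L' - L) := by
    unfold pvWin
    rw [List.drop_drop]
    congr 1; omega
  rw [this]
  exact h.sublist (List.drop_sublist _ _)

lemma pvS_succ (nums : List Int) (k : Nat) (h : k < nums.length) :
    (nums.take (k+1)).sum = (nums.take k).sum + nums.getD k 0 := by
  rw [List.sum_take_succ nums k h]
  simp [List.getD, List.getElem?_eq_getElem h]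

lemma pvPrefix_eq (nums : List Int) :
    pvPrefix nums = (List.range (nums.length + 1)).map (fun k => (nums.take k).sum) := by
  induction nums using List.reverseRecOn with
  | nil => simp [pvPrefix]
  | append_singleton ys x ih =>
    unfold pvPrefix at *
    rw [List.foldl_append, ih]
    simp only [List.foldl_cons, List.foldl_nil]
    have hlast : ((List.range (ys.length + 1)).map (fun k => (ys.take k).sum)).getLastD 0
        = ys.sum := by
      rw [List.range_succ, List.map_append]
      simp only [List.map_cons, List.map_nil]
      rw [List.getLastD_concat]
      simp
    rw [hlast]
    have hlen : (ys ++ [x]).length = ys.length + 1 := by simp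
    rw [hlen, List.range_succ (n := ys.length + 1), List.map_append]
    congr 1
    · apply List.map_congr_left
      intro k hk
      rw [List.mem_range] at hk
      rw [List.take_append_of_le_length (by omega)]
    · simp [List.take_of_length_le (show (ys ++ [x]).length ≤ ys.length + 1 by simp)]

lemma pvPrefix_getD (nums : List Int) (k : Nat) (h : k ≤ nums.length) :
    (pvPrefix nums).getD k 0 = (nums.take k).sum := by
  rw [pvPrefix_eq]
  exact PySem.List.getD_map_range _ _ _ _ (by omega)

lemma pvMaxIf (a b : Int) : (if a < b then b else a) = max a b := by
  rcases le_total b a with h | h <;> simp [max_def] <;> omega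

lemma pvShrink_stop (nums : List Int) (v : Int) (fuel : Nat) (hf : 0 < fuel)
    (cnts : PySem.Dict Int Int) (curr : Int) (left : Nat) (h : ¬ 1 < cnts.getD v 0) :
    pvShrink nums v fuel (cnts, curr, left) = (cnts, curr, left) := by
  cases fuel with
  | zero => omega
  | succ f => simp [pvShrink, h]

lemma pvShrink_spec (nums : List Int) (v : Int) (r i0 : Nat)
    (hr : r < nums.length) (hvr : nums.getD r 0 = v)
    (hi0r : i0 < r) (hvi0 : nums.getD i0 0 = v)
    (hocc : ∀ k, k < r → nums.getD k 0 = v → k ≤ i0) :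
    ∀ fuel L cnts curr,
      L ≤ i0 + 1 →
      i0 + 1 - L < fuel →
      (∀ x, cnts.getD x 0 = ((pvWin nums L (r+1)).count x : Int)) →
      (pvWin nums L r).Nodup →
      curr = (nums.take (r+1)).sum - (nums.take L).sum →
      ∃ cnts', pvShrink nums v fuel (cnts, curr, L) =
          (cnts', (nums.take (r+1)).sum - (nums.take (i0+1)).sum, i0 + 1) ∧
        ∀ x, cnts'.getD x 0 = ((pvWin nums (i0+1) (r+1)).count x : Int) := by
  intro fuel
  induction fuel with
  | zero => intro L cnts curr h1 h2 _ _ _; omega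
  | succ f ih =>
    intro L cnts curr hL hf hcnt hnd hcurr
    by_cases hcase : L ≤ i0
    · -- the window still contains the earlier occurrence of v: the loop body runs once more
      have hsnoc : pvWin nums L (r+1) = pvWin nums L r ++ [nums.getD r 0] :=
        pvWin_snoc nums L r (by omega) hr
      have hmem : v ∈ pvWin nums L r :=
        (pvMem_win_iff nums v L r (le_of_lt hr)).mpr ⟨i0, hcase, hi0r, hvi0⟩
      have hcv : (pvWin nums L r).count v = 1 := List.count_eq_one_of_mem hnd hmem
      have hcond : 1 < cnts.getD v 0 := by
        rw [hcnt v, hsnoc, List.count_append, hcv, hvr]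
        simp
      have hconsr1 : pvWin nums L (r+1) = nums.getD L 0 :: pvWin nums (L+1) (r+1) :=
        pvWin_cons nums L (r+1) (by omega) (by omega)
      have hconsr : pvWin nums L r = nums.getD L 0 :: pvWin nums (L+1) r :=
        pvWin_cons nums L r (by omega) (le_of_lt hr)
      simp only [pvShrink, hcond, if_true]
      apply ih (L+1) _ _ (by omega) (by omega)
      · intro x
        rw [PySem.Dict.getD_modify, hcnt x, hconsr1, hcnt (nums.getD L 0), hconsr1]
        by_cases hx : x = nums.getD L 0
        · subst hx
          simp
        · rw [if_neg hx, List.count_cons]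
          simp only [beq_iff_eq]
          rw [if_neg (fun h => hx h.symm), Nat.add_zero]
      · rw [hconsr] at hnd
        exact (List.nodup_cons.mp hnd).2
      · rw [hcurr, pvS_succ nums L (by omega)]
        ring
    · -- L = i0 + 1: the duplicate has been evicted, the loop stops
      have hLe : L = i0 + 1 := by omega
      subst hLe
      have hsnoc : pvWin nums (i0+1) (r+1) = pvWin nums (i0+1) r ++ [nums.getD r 0] :=
        pvWin_snoc nums (i0+1) r (by omega) hr
      have hnomem : v ∉ pvWin nums (i0+1) r := by
        intro hm
        obtain ⟨i, hi1, hi2, hi3⟩ := (pvMem_win_iff nums v (i0+1) r (le_of_lt hr)).mp hm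
        have := hocc i hi2 hi3
        omega
      have hcv : (pvWin nums (i0+1) r).count v = 0 := List.count_eq_zero_of_not_mem hnomem
      have hcond : ¬ 1 < cnts.getD v 0 := by
        rw [hcnt v, hsnoc, List.count_append, hcv, hvr]
        simp
      simp only [pvShrink, hcond, if_false]
      exact ⟨cnts, by rw [hcurr], hcnt⟩

lemma pvFoldA_succ (nums : List Int) (r : Nat) :
    pvFoldA nums (r+1) = pvStepA nums (pvFoldA nums r) r := by
  unfold pvFoldA
  rw [List.range_succ, List.foldl_append]
  simp

lemma pvFoldB_succ (nums : List Int) (r : Nat) (h : r < nums.length) :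
    pvFoldB nums (r+1) = pvStepB (pvPrefix nums) (pvFoldB nums r) (nums.getD r 0, r) := by
  unfold pvFoldB
  rw [List.take_add_one, List.getElem?_eq_getElem h, List.zipIdx_append, List.foldl_append]
  simp [List.length_take, Nat.min_eq_left (le_of_lt h), List.getD, List.getElem?_eq_getElem h]

-- adding nums[r] to the counts dict matches extending the window on the right
lemma pvCounts_add (nums : List Int) (L r : Nat) (hL : L ≤ r) (hr : r < nums.length)
    (c : PySem.Dict Int Int) (hc : ∀ x, c.getD x 0 = ((pvWin nums L r).count x : Int)) :
    ∀ x, (c.modify (nums.getD r 0) 0 (· + 1)).getD x 0 = ((pvWin nums L (r+1)).count x : Int) := by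
  intro x
  rw [PySem.Dict.getD_modify, pvWin_snoc nums L r hL hr, List.count_append]
  by_cases hx : x = nums.getD r 0
  · subst hx
    rw [if_pos rfl, hc]
    simp
  · rw [if_neg hx, hc, List.count_singleton]
    simp only [beq_iff_eq]
    rw [if_neg (fun h => hx h.symm), Nat.add_zero]

-- updating last_index[v] = r preserves the last-occurrence characterisation
lemma pvLast_update (nums : List Int) (r : Nat) (hr : r < nums.length)
    (d : PySem.Dict Int Nat)
    (hsome : ∀ x i, d.get? x = some i →
      i < r ∧ nums.getD i 0 = x ∧ ∀ k, i < k → k < r → nums.getD k 0 ≠ x)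
    (hnone : ∀ x, d.get? x = none → ∀ k, k < r → nums.getD k 0 ≠ x) :
    (∀ x i, (d.insert (nums.getD r 0) r).get? x = some i →
      i < r + 1 ∧ nums.getD i 0 = x ∧ ∀ k, i < k → k < r + 1 → nums.getD k 0 ≠ x) ∧
    (∀ x, (d.insert (nums.getD r 0) r).get? x = none →
      ∀ k, k < r + 1 → nums.getD k 0 ≠ x) := by
  constructor
  · intro x i h
    rw [PySem.Dict.get?_insert] at h
    by_cases hx : x = nums.getD r 0
    · rw [if_pos hx] at h
      cases h
      exact ⟨by omega, hx.symm, by intro k h1 h2; omega⟩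
    · rw [if_neg hx] at h
      obtain ⟨h1, h2, h3⟩ := hsome x i h
      refine ⟨by omega, h2, ?_⟩
      intro k hk1 hk2
      by_cases hkr : k = r
      · subst hkr; exact fun he => hx he.symm
      · exact h3 k hk1 (by omega)
  · intro x h
    rw [PySem.Dict.get?_insert] at h
    by_cases hx : x = nums.getD r 0
    · rw [if_pos hx] at h; cases h
    · rw [if_neg hx] at h
      intro k hk
      by_cases hkr : k = r
      · subst hkr; exact fun he => hx he.symm
      · exact hnone x h k (by omega)

lemma pvInv_holds (nums : List Int) : ∀ r, r ≤ nums.length →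
    pvInv nums r (pvFoldA nums r) (pvFoldB nums r) := by
  intro r
  induction r with
  | zero =>
    intro _
    have hA : pvFoldA nums 0 = (PySem.Dict.empty, 0, 0, 0) := rfl
    have hB : pvFoldB nums 0 = (PySem.Dict.empty, 0, 0) := by
      unfold pvFoldB
      simp
    rw [hA, hB]
    unfold pvInv
    refine ⟨rfl, rfl, le_rfl, by simp, by simp [pvWin], by simp [pvWin], ?_, ?_⟩
    · intro x i h
      rw [PySem.Dict.get?_empty] at h
      cases h
    · intro x _ k hk
      omega
  | succ r ih =>
    intro hr1
    have hrlt : r < nums.length := by omega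
    obtain ⟨hleft, hmax, hLr, hcurr, hnd, hcnt, hsome, hnone⟩ := ih (by omega)
    rw [pvFoldA_succ, pvFoldB_succ nums r hrlt]
    set A := pvFoldA nums r with hA
    set B := pvFoldB nums r with hB
    clear_value A B
    obtain ⟨ca, La, ma, sa⟩ := A
    obtain ⟨db, Lb, mb⟩ := B
    dsimp only at hleft hmax hLr hcurr hnd hcnt hsome hnone ⊢
    subst hleft hmax
    set v := nums.getD r 0 with hv
    -- counts after `counts[nums[right]] += 1`
    have hc1 := pvCounts_add nums La r hLr hrlt ca hcnt
    have hcurr1 : sa + v = (nums.take (r+1)).sum - (nums.take La).sum := by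
      rw [hcurr, pvS_succ nums r hrlt, hv]
      ring
    have hlast := pvLast_update nums r hrlt db hsome hnone
    by_cases hin : ∃ i0, db.get? v = some i0 ∧ La ≤ i0
    · -- v occurs inside the current window: both programs move left to i0 + 1
      obtain ⟨i0, hg, hLi0⟩ := hin
      obtain ⟨hi0r, hvi0, hmaxi0⟩ := hsome v i0 hg
      have hocc : ∀ k, k < r → nums.getD k 0 = v → k ≤ i0 := by
        intro k hk hkv
        by_contra hgt
        exact hmaxi0 k (by omega) hk hkv
      obtain ⟨cnts', hshr, hcnt'⟩ :=
        pvShrink_spec nums v r i0 hrlt hv.symm hi0r hvi0 hocc nums.length La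
          (ca.modify v 0 (· + 1)) (sa + v) (by omega) (by omega) hc1 hnd hcurr1
      have hstepA : pvStepA nums (ca, La, ma, sa) r =
          (cnts', i0 + 1, max ma ((nums.take (r+1)).sum - (nums.take (i0+1)).sum),
            (nums.take (r+1)).sum - (nums.take (i0+1)).sum) := by
        simp only [pvStepA, ← hv, hshr]
      have hstepB : pvStepB (pvPrefix nums) (db, La, ma) (v, r) =
          (db.insert v r, i0 + 1,
            if ma < (nums.take (r+1)).sum - (nums.take (i0+1)).sum then
              (nums.take (r+1)).sum - (nums.take (i0+1)).sum else ma) := by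
        simp only [pvStepB, hg]
        rw [if_pos (by omega : La < i0 + 1)]
        rw [pvPrefix_getD nums (r+1) (by omega), pvPrefix_getD nums (i0+1) (by omega)]
      rw [hstepA, hstepB]
      have hnd' : (pvWin nums (i0+1) (r+1)).Nodup := by
        rw [pvWin_snoc nums (i0+1) r (by omega) hrlt]
        have h1 : (pvWin nums (i0+1) r).Nodup := pvWin_suffix_nodup nums La (i0+1) r (by omega) hnd
        have h2 : v ∉ pvWin nums (i0+1) r := by
          intro hm
          obtain ⟨i, hi1, hi2, hi3⟩ := (pvMem_win_iff nums v (i0+1) r (le_of_lt hrlt)).mp hm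
          exact hmaxi0 i (by omega) hi2 hi3
        rw [← hv]
        apply List.Nodup.append h1 (List.nodup_singleton v)
        intro a ha
        simp only [List.mem_singleton]
        exact fun he => h2 (he ▸ ha)
      exact ⟨rfl, (pvMaxIf ma _).symm, by show i0 + 1 ≤ r + 1; omega, rfl, hnd', hcnt',
        hlast.1, hlast.2⟩
    · -- v is not in the current window: left stays, the while loop does not run
      have hnomem : v ∉ pvWin nums La r := by
        intro hm
        obtain ⟨i, hi1, hi2, hi3⟩ := (pvMem_win_iff nums v La r (le_of_lt hrlt)).mp hm
        cases hg : db.get? v with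
        | none => exact hnone v hg i hi2 hi3
        | some i0 =>
          have hi0lt : ¬ La ≤ i0 := fun hle => hin ⟨i0, hg, hle⟩
          obtain ⟨_, _, hmaxi0⟩ := hsome v i0 hg
          exact hmaxi0 i (by omega) hi2 hi3
      have hc1v : (ca.modify v 0 (· + 1)).getD v 0 = 1 := by
        rw [hc1 v, pvWin_snoc nums La r hLr hrlt, List.count_append,
          List.count_eq_zero_of_not_mem hnomem, ← hv]
        simp
      have hstop := pvShrink_stop nums v nums.length (by omega)
        (ca.modify v 0 (· + 1)) (sa + v) La (by rw [hc1v]; omega)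
      have hstepA : pvStepA nums (ca, La, ma, sa) r =
          (ca.modify v 0 (· + 1), La, max ma (sa + v), sa + v) := by
        simp only [pvStepA, ← hv, hstop]
      have hjLa : ∀ j : Nat, (match db.get? v with | some i => i + 1 | none => 0) = j → j ≤ La := by
        intro j hj
        cases hg : db.get? v with
        | none =>
          rw [hg] at hj
          simp at hj
          omega
        | some i0 =>
          have hi0lt : ¬ La ≤ i0 := fun hle => hin ⟨i0, hg, hle⟩
          rw [hg] at hj
          have hj' : i0 + 1 = j := hj
          omega
      have hstepB : pvStepB (pvPrefix nums) (db, La, ma) (v, r) =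
          (db.insert v r, La, if ma < sa + v then sa + v else ma) := by
        simp only [pvStepB]
        rw [if_neg (by have := hjLa _ rfl; omega)]
        rw [pvPrefix_getD nums (r+1) (by omega), pvPrefix_getD nums La (by omega), ← hcurr1]
      rw [hstepA, hstepB]
      have hnd' : (pvWin nums La (r+1)).Nodup := by
        rw [pvWin_snoc nums La r hLr hrlt]
        rw [← hv]
        apply List.Nodup.append hnd (List.nodup_singleton v)
        intro a ha
        simp only [List.mem_singleton]
        exact fun he => hnomem (he ▸ ha)
      exact ⟨rfl, (pvMaxIf ma _).symm, by show La ≤ r + 1; omega, hcurr1, hnd', hc1,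
        hlast.1, hlast.2⟩

-- ===== VERDICT (by name: the statement is the Claim_ definition above) =====
theorem max_subarray_unique_spec : Claim_equal_max_subarray_unique := by
  intro nums _
  unfold Spec_max_subarray_unique max_subarray_unique max_subarray_unique_alt
  by_cases h1 : nums.length = 1
  · simp [h1]
  · simp only [h1, if_false]
    have h := pvInv_holds nums nums.length le_rfl
    have hA : (pvFoldA nums nums.length).2.2.1 =
        ((List.range nums.length).foldl (pvStepA nums) (PySem.Dict.empty, 0, 0, 0)).2.2.1 := rfl
    have hB : (pvFoldB nums nums.length).2.2 =
        (nums.zipIdx.foldl (pvStepB (pvPrefix nums)) (PySem.Dict.empty, 0, 0)).2.2 := by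
      unfold pvFoldB; rw [List.take_length]
    rw [← hA, ← hB]
    exact h.2.1
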